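-- pv_equiv track=rewrite | github.com/shan-mathi/Codeforces | 489C - Given Length and Sum of Digits.py | larg_smallest
-- ===== SOURCE A (Python) =====
-- def larg_smallest(m,s):
--     if m*9 <s:
--         return "-1 -1"
--     if m==1 and s==0:
--         return "0 0"
--     if s<1:
--         return "-1 -1"
--
--     #largest
--     l=''
--     sl=s
--     for i in range(m):
--         if sl>=9:
--             l+='9'
--             sl-=9
--         else:
--             l+= str(sl)
--             sl=0
--     #smallest
--     if l[-1]!='0':
--         s = l[::-1]
--         return (s+' '+l)
--     s='1'
--     count=0
--     for i,v in enumerate(l[::-1][1:]):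
--         if v=='0':
--             s+='0'
--
--
--         elif v>'0':
--             s+= str(int(v)-1) + l[::-1][i+2:]
--             break
--     return (s+' '+l)
-- ===== SOURCE B (Python) =====
-- def larg_smallest(m, s):
--     if m*9 < s:
--         return "-1 -1"
--     if m == 1 and s == 0:
--         return "0 0"
--     if s < 1:
--         return "-1 -1"
--     # largest: greedy digits front to back
--     digs = []
--     t = s
--     for _ in range(m):
--         d = 9 if t >= 9 else t
--         digs.append(d)
--         t -= d
--     largest = ''.join(str(d) for d in digs)
--     # smallest: reserve 1 for the leading digit, fill from the back
--     t = s - 1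
--     tail = []
--     for _ in range(m - 1):
--         d = 9 if t >= 9 else t
--         tail.append(d)
--         t -= d
--     small = [t + 1] + tail[::-1]
--     smallest = ''.join(str(d) for d in small)
--     return smallest + ' ' + largest
-- ===== Notes on version B (the rewrite author's own statement) =====
-- stated objective: simpler
-- what changed: The smallest number is computed directly by a backward greedy fill (reserve 1 for the leading digit, place min(9,t) from the last position inward, head digit = leftover+1) instead of A's reverse-the-largest-then-scan-for-the-first-nonzero-and-patch string surgery; the largest is built as a digit list joined once.
import Mathlib
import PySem

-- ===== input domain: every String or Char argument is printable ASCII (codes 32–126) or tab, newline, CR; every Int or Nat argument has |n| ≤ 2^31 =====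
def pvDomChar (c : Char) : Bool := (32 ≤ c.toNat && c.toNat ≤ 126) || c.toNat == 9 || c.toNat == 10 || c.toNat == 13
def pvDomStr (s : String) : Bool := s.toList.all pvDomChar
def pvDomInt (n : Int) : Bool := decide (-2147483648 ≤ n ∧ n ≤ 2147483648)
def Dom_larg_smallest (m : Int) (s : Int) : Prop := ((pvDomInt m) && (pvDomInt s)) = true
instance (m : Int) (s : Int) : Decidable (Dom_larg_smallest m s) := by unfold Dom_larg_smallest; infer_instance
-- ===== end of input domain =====

-- B computes the smallest number directly by a backward greedy fill instead of A's
-- reverse-the-largest-then-scan-and-patch, and builds the largest as a digit list joined once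
-- (objective: simpler).

-- ===== PORT A =====
-- A-side helper: the body of A's 'for i in range(m)' loop over the state (l, sl)
def laStep (st : List Char × Int) (_ : Int) : List Char × Int :=
  if st.2 ≥ 9 then (st.1 ++ ['9'], st.2 - 9)
  else (st.1 ++ PySem.Int.toChars st.2, 0)

-- A-side helper: A's 'for i,v in enumerate(l[::-1][1:])' loop with its break;
-- 'int(v)' is PySem.Int.ofChars? — v is always a decimal digit at that line, so '.getD 0' is never used
def laScan (lrev : List Char) : List (Int × Char) → List Char → List Char
  | [], acc => acc
  | (i, v) :: rest, acc =>
    if v = '0' then laScan lrev rest (acc ++ ['0'])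
    else if '0' < v then
      acc ++ PySem.Int.toChars ((PySem.Int.ofChars? [v]).getD 0 - 1)
          ++ PySem.List.slice lrev (some (i + 2)) none
    else laScan lrev rest acc

def larg_smallest (m : Int) (s : Int) : String :=
  if m * 9 < s then "-1 -1"
  else if m = 1 ∧ s = 0 then "0 0"
  else if s < 1 then "-1 -1"
  else
    let l := ((PySem.List.pyRange 0 m 1).foldl laStep ([], s)).1
    -- l[-1]; the 'none' (IndexError) arm is unreachable: m ≥ 1 whenever this line runs
    match PySem.List.pyGet? l (-1) with
    | none => ""
    | some c =>
      -- l[::-1] is l.reverse (PySem.List.slice?_none_none_neg_one); l[::-1][1:] is its tail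
      if c ≠ '0' then
        String.mk (l.reverse ++ ' ' :: l)
      else
        String.mk (laScan l.reverse (PySem.List.enumerate (l.reverse.drop 1) 0) ['1'] ++ ' ' :: l)

-- ===== PORT B =====
-- B-side helper: one greedy step 'd = 9 if t >= 9 else t; out.append(d); t -= d', shared by B's two loops
def lbStep (st : List Int × Int) (_ : Int) : List Int × Int :=
  let d := if st.2 ≥ 9 then (9 : Int) else st.2
  (st.1 ++ [d], st.2 - d)

-- B-side helper: ''.join(str(d) for d in ds)
def lbJoin (ds : List Int) : List Char :=
  PySem.Chars.join [] (ds.map PySem.Int.toChars)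

def larg_smallest_alt (m : Int) (s : Int) : String :=
  if m * 9 < s then "-1 -1"
  else if m = 1 ∧ s = 0 then "0 0"
  else if s < 1 then "-1 -1"
  else
    let digs := ((PySem.List.pyRange 0 m 1).foldl lbStep ([], s)).1
    let p := (PySem.List.pyRange 0 (m - 1) 1).foldl lbStep ([], s - 1)
    let small := (p.2 + 1) :: p.1.reverse    -- [t + 1] + tail[::-1]
    String.mk (lbJoin small ++ ' ' :: lbJoin digs)

-- ===== PRECONDITION & SPEC =====
def Spec_larg_smallest (m : Int) (s : Int) (out : String) : Prop := out = larg_smallest_alt m s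
instance (m : Int) (s : Int) (out : String) : Decidable (Spec_larg_smallest m s out) := by unfold Spec_larg_smallest; infer_instance

-- ===== CLAIM (what is proved, stated in full; the proofs are below) =====
def Claim_equal_larg_smallest : Prop := ∀ (m : Int) (s : Int), Dom_larg_smallest m s → Spec_larg_smallest m s (larg_smallest m s)

-- ===== LEMMAS AND PROOFS =====

-- digit character
def dC (d : Nat) : Char := Char.ofNat (48 + d)

theorem toChars_digit (d : Nat) (h : d ≤ 9) : PySem.Int.toChars (d : Int) = [dC d] := by
  interval_cases d <;> decide

theorem ofChars_digit (d : Nat) (h : d ≤ 9) : PySem.Int.ofChars? [dC d] = some (d : Int) := by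
  interval_cases d <;> decide

theorem dC_pos (d : Nat) (h1 : 1 ≤ d) (h9 : d ≤ 9) : '0' < dC d := by
  interval_cases d <;> decide

theorem toChars_nine : PySem.Int.toChars (9 : Int) = ['9'] := by decide

theorem toChars_zero : PySem.Int.toChars (0 : Int) = ['0'] := by decide

-- join with empty separator is flatten
theorem join_nil_eq_flatten (xs : List (List Char)) : PySem.Chars.join [] xs = xs.flatten := by
  induction xs with
  | nil => rfl
  | cons x xs ih =>
    cases xs with
    | nil => simp [PySem.Chars.join, List.intercalate]
    | cons y ys =>
      simp only [PySem.Chars.join, List.intercalate, List.intersperse] at *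
      simp_all

theorem lbJoin_nil : lbJoin [] = [] := by simp [lbJoin, join_nil_eq_flatten]

theorem lbJoin_cons (d : Int) (ds : List Int) :
    lbJoin (d :: ds) = PySem.Int.toChars d ++ lbJoin ds := by
  simp [lbJoin, join_nil_eq_flatten]

theorem lbJoin_append (a b : List Int) : lbJoin (a ++ b) = lbJoin a ++ lbJoin b := by
  simp [lbJoin, join_nil_eq_flatten]

theorem lbJoin_replicate0 (n : Nat) : lbJoin (List.replicate n (0 : Int)) = List.replicate n '0' := by
  induction n with
  | zero => exact lbJoin_nil
  | succ n ih => rw [List.replicate_succ, lbJoin_cons, ih, toChars_zero, List.replicate_succ]; rfl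

theorem lbJoin_replicate9 (n : Nat) : lbJoin (List.replicate n (9 : Int)) = List.replicate n '9' := by
  induction n with
  | zero => exact lbJoin_nil
  | succ n ih => rw [List.replicate_succ, lbJoin_cons, ih, toChars_nine, List.replicate_succ]; rfl

-- iterated-step views of the two foldl loops
def stepA (st : List Char × Int) : List Char × Int := laStep st 0
def stepB (st : List Int × Int) : List Int × Int := lbStep st 0

theorem foldl_laStep (l : List Int) (st : List Char × Int) :
    l.foldl laStep st = stepA^[l.length] st := by
  induction l generalizing st with
  | nil => rfl
  | cons a l ih => simp [List.foldl_cons, ih, Function.iterate_succ_apply, stepA, laStep]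

theorem foldl_lbStep (l : List Int) (st : List Int × Int) :
    l.foldl lbStep st = stepB^[l.length] st := by
  induction l generalizing st with
  | nil => rfl
  | cons a l ih => simp [List.foldl_cons, ih, Function.iterate_succ_apply, stepB, lbStep]

-- reference recursions for the loop results
def LA : Nat → Int → List Char
  | 0, _ => []
  | n+1, t => if t ≥ 9 then '9' :: LA n (t - 9) else PySem.Int.toChars t ++ LA n 0

def DBd : Nat → Int → List Int
  | 0, _ => []
  | n+1, t => (if t ≥ 9 then (9:Int) else t) :: DBd n (t - (if t ≥ 9 then (9:Int) else t))

def TB : Nat → Int → Int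
  | 0, t => t
  | n+1, t => TB n (t - (if t ≥ 9 then (9:Int) else t))

theorem stepA_iter (n : Nat) (l : List Char) (t : Int) :
    (stepA^[n] (l, t)).1 = l ++ LA n t := by
  induction n generalizing l t with
  | zero => simp [LA]
  | succ n ih =>
    rw [Function.iterate_succ_apply]
    by_cases h : t ≥ 9
    · simp [stepA, laStep, h, ih, LA]
    · simp [stepA, laStep, h, ih, LA]

theorem stepB_iter (n : Nat) (l : List Int) (t : Int) :
    stepB^[n] (l, t) = (l ++ DBd n t, TB n t) := by
  induction n generalizing l t with
  | zero => simp [DBd, TB]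
  | succ n ih =>
    rw [Function.iterate_succ_apply]
    by_cases h : t ≥ 9
    · simp [stepB, lbStep, h, ih, DBd, TB]
    · simp [stepB, lbStep, h, ih, DBd, TB]

-- the two largest-number builders agree
theorem DBd_join (n : Nat) : ∀ t : Int, 0 ≤ t → lbJoin (DBd n t) = LA n t := by
  induction n with
  | zero => intro t _; simp [DBd, LA, lbJoin_nil]
  | succ n ih =>
    intro t ht
    by_cases h : t ≥ 9
    · simp only [DBd, LA, if_pos h, lbJoin_cons, ih (t - 9) (by omega), toChars_nine]
      rfl
    · simp only [DBd, LA, if_neg h, lbJoin_cons, sub_self]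
      rw [ih 0 le_rfl]

-- closed forms
theorem LA_zeros (n : Nat) : LA n 0 = List.replicate n '0' := by
  induction n with
  | zero => simp [LA]
  | succ n ih =>
    rw [List.replicate_succ]
    simp only [LA, ih]
    norm_num [toChars_zero]

theorem LA_nines (n : Nat) : LA n (9 * (n : Int)) = List.replicate n '9' := by
  induction n with
  | zero => simp [LA]
  | succ n ih =>
    have h9 : (9 : Int) * ((n : Nat) + 1 : Nat) ≥ 9 := by push_cast; omega
    rw [List.replicate_succ]
    simp only [LA, if_pos h9]
    have h : (9 : Int) * ((n : Nat) + 1 : Nat) - 9 = 9 * (n : Int) := by push_cast; ring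
    rw [h, ih]

theorem LA_lt (n : Nat) : ∀ k r : Nat, r ≤ 8 → k < n →
    LA n (9 * (k : Int) + (r : Int)) = List.replicate k '9' ++ dC r :: List.replicate (n - k - 1) '0' := by
  induction n with
  | zero => intro k r _ hk; omega
  | succ n ih =>
    intro k r hr hk
    cases k with
    | zero =>
      have hlt : ¬ (9 * ((0:Nat) : Int) + (r : Int) ≥ 9) := by push_cast; omega
      simp only [LA, if_neg hlt]
      have : (9 : Int) * ((0:Nat) : Int) + (r : Int) = ((r : Nat) : Int) := by push_cast; ring
      rw [this, toChars_digit r (by omega), LA_zeros]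
      simp
    | succ k =>
      have hge : 9 * (((k+1 : Nat)) : Int) + (r : Int) ≥ 9 := by push_cast; omega
      simp only [LA, if_pos hge]
      have h : 9 * (((k+1 : Nat)) : Int) + (r : Int) - 9 = 9 * ((k : Nat) : Int) + (r : Int) := by
        push_cast; ring
      rw [h, ih k r hr (by omega), List.replicate_succ]
      simp [Nat.succ_sub_succ]

theorem DBd_zeros (n : Nat) : DBd n 0 = List.replicate n 0 ∧ TB n 0 = 0 := by
  induction n with
  | zero => simp [DBd, TB]
  | succ n ih => simp [DBd, TB, ih, List.replicate_succ]

theorem DBd_ge (n : Nat) : ∀ k r : Nat, r ≤ 8 → n ≤ k →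
    DBd n (9 * (k : Int) + (r : Int)) = List.replicate n (9 : Int) ∧
    TB n (9 * (k : Int) + (r : Int)) = 9 * ((k : Int) - (n : Int)) + (r : Int) := by
  induction n with
  | zero => intro k r hr hk; simp [DBd, TB]
  | succ n ih =>
    intro k r hr hk
    have hge : 9 * ((k : Nat) : Int) + (r : Int) ≥ 9 := by
      have : (1:Int) ≤ (k : Int) := by exact_mod_cast Nat.one_le_iff_ne_zero.mpr (by omega)
      omega
    have h : 9 * ((k : Nat) : Int) + (r : Int) - 9 = 9 * (((k-1 : Nat)) : Int) + (r : Int) := by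
      have : ((k - 1 : Nat) : Int) = (k : Int) - 1 := by omega
      rw [this]; ring
    obtain ⟨ih1, ih2⟩ := ih (k-1) r hr (by omega)
    constructor
    · simp only [DBd, if_pos hge, h, ih1, List.replicate_succ]
    · simp only [TB, if_pos hge, h, ih2]
      have : ((k - 1 : Nat) : Int) = (k : Int) - 1 := by omega
      rw [this]; push_cast; ring

theorem DBd_lt (n : Nat) : ∀ k r : Nat, r ≤ 8 → k < n →
    DBd n (9 * (k : Int) + (r : Int)) =
      List.replicate k (9 : Int) ++ (r : Int) :: List.replicate (n - k - 1) 0 ∧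
    TB n (9 * (k : Int) + (r : Int)) = 0 := by
  induction n with
  | zero => intro k r hr hk; omega
  | succ n ih =>
    intro k r hr hk
    cases k with
    | zero =>
      have hlt : ¬ (9 * ((0:Nat) : Int) + (r : Int) ≥ 9) := by push_cast; omega
      have h0 : 9 * ((0:Nat) : Int) + (r : Int) - (9 * ((0:Nat) : Int) + (r : Int)) = 0 := by ring
      obtain ⟨z1, z2⟩ := DBd_zeros n
      constructor
      · simp only [DBd, if_neg hlt, h0, z1]
        push_cast; simp
      · simp only [TB, if_neg hlt, h0, z2]
    | succ k =>
      have hge : 9 * (((k+1 : Nat)) : Int) + (r : Int) ≥ 9 := by push_cast; omega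
      have h : 9 * (((k+1 : Nat)) : Int) + (r : Int) - 9 = 9 * ((k : Nat) : Int) + (r : Int) := by
        push_cast; ring
      obtain ⟨ih1, ih2⟩ := ih k r hr (by omega)
      constructor
      · simp only [DBd, if_pos hge, h, ih1, List.replicate_succ, Nat.succ_sub_succ]
        simp
      · simp only [TB, if_pos hge, h, ih2]

-- evaluation of A's scan loop: z zeros, then the digit d ≥ 1 at which it breaks
theorem laScan_eval (lrev rest : List Char) (d : Nat) (hd1 : 1 ≤ d) (hd9 : d ≤ 9) :
    ∀ (z : Nat) (i0 : Int) (acc : List Char),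
    laScan lrev (PySem.List.enumerate (List.replicate z '0' ++ dC d :: rest) i0) acc
    = acc ++ List.replicate z '0' ++ PySem.Int.toChars ((d : Int) - 1)
        ++ PySem.List.slice lrev (some (i0 + (z : Int) + 2)) none := by
  intro z
  induction z with
  | zero =>
    intro i0 acc
    have hne : ¬ (dC d = '0') := by
      have := dC_pos d hd1 hd9
      intro h; rw [h] at this; exact lt_irrefl _ this
    simp only [List.replicate, List.nil_append, PySem.List.enumerate_cons, laScan,
      if_neg hne, if_pos (dC_pos d hd1 hd9), ofChars_digit d hd9]
    norm_num
  | succ z ih =>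
    intro i0 acc
    simp only [List.replicate_succ, List.cons_append, PySem.List.enumerate_cons, laScan,
      if_pos rfl]
    rw [ih (i0 + 1) (acc ++ ['0'])]
    have hidx : (i0 + 1) + (z : Int) + 2 = i0 + ((z+1 : Nat) : Int) + 2 := by
      push_cast; ring
    rw [hidx]
    simp [List.append_assoc, List.replicate_succ]


-- projection forms of stepB_iter
theorem stepB_iter1 (n : Nat) (l : List Int) (t : Int) :
    (stepB^[n] (l, t)).1 = l ++ DBd n t := by rw [stepB_iter]

theorem stepB_iter2 (n : Nat) (l : List Int) (t : Int) :
    (stepB^[n] (l, t)).2 = TB n t := by rw [stepB_iter]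

theorem dC_zero : dC 0 = '0' := by decide
theorem dC_nine : dC 9 = '9' := by decide
theorem toChars_one : PySem.Int.toChars (1 : Int) = ['1'] := by decide
theorem toChars_eight : PySem.Int.toChars (8 : Int) = ['8'] := by decide

-- small list-shuffling helpers
theorem replicate_append_cons' (c : Char) (z : Nat) (l : List Char) :
    List.replicate z c ++ c :: l = c :: (List.replicate z c ++ l) := by
  induction z with
  | zero => rfl
  | succ z ih => simp [List.replicate_succ, ih]

theorem drop_replicate (c : Char) (n k : Nat) (l : List Char) :
    (List.replicate n c ++ l).drop (n + k) = l.drop k := by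
  induction n with
  | zero => simp
  | succ n ih =>
    rw [List.replicate_succ, List.cons_append, show n + 1 + k = (n + k) + 1 from by omega,
      List.drop_succ_cons, ih]

theorem main_equiv (m s : Int) : larg_smallest m s = larg_smallest_alt m s := by
  by_cases hg1 : m * 9 < s
  · unfold larg_smallest larg_smallest_alt
    rw [if_pos hg1, if_pos hg1]
  by_cases hg2 : m = 1 ∧ s = 0
  · unfold larg_smallest larg_smallest_alt
    rw [if_neg hg1, if_pos hg2, if_neg hg1, if_pos hg2]
  by_cases hg3 : s < 1
  · unfold larg_smallest larg_smallest_alt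
    rw [if_neg hg1, if_neg hg2, if_pos hg3, if_neg hg1, if_neg hg2, if_pos hg3]
  -- main branch: 1 ≤ s, s ≤ 9m, hence 1 ≤ m
  obtain ⟨M, rfl⟩ : ∃ M : Nat, m = (M : Int) := ⟨m.toNat, by omega⟩
  obtain ⟨S, rfl⟩ : ∃ S : Nat, s = (S : Int) := ⟨s.toNat, by omega⟩
  have hM1 : 1 ≤ M := by omega
  have hS1 : 1 ≤ S := by omega
  have hSM : S ≤ 9 * M := by omega
  unfold larg_smallest larg_smallest_alt
  rw [if_neg hg1, if_neg hg2, if_neg hg3, if_neg hg1, if_neg hg2, if_neg hg3]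
  simp only [foldl_laStep, foldl_lbStep, PySem.List.length_pyRange_one, Int.sub_zero,
    Int.toNat_natCast, stepA_iter, stepB_iter1, stepB_iter2, List.nil_append]
  rw [show ((M : Int) - 1).toNat = M - 1 from by omega]
  rw [show lbJoin (DBd M ((S : Nat) : Int)) = LA M ((S : Nat) : Int) from
      DBd_join M _ (by omega)]
  obtain ⟨k, r, hr8, hSkr⟩ : ∃ k r, r ≤ 8 ∧ S = 9 * k + r := ⟨S / 9, S % 9, by omega, by omega⟩
  by_cases hkM : k < M
  · -- S < 9*M : the largest has the form 9…9 d 0…0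
    have hLAc : LA M ((S : Nat) : Int)
        = List.replicate k '9' ++ dC r :: List.replicate (M - k - 1) '0' := by
      rw [show ((S : Nat) : Int) = 9 * ((k : Nat) : Int) + ((r : Nat) : Int) from by omega]
      exact LA_lt M k r hr8 hkM
    rw [hLAc]
    by_cases hMk : M = k + 1
    · -- no trailing zeros beyond the digit d itself
      rw [show M - k - 1 = 0 from by omega, List.replicate_zero]
      rw [PySem.List.pyGet?_neg_one, List.getLast?_concat]
      by_cases hr0 : r = 0
      · -- S = 9k, k ≥ 1: largest 9…90, smallest 1 8 9…9
        subst hr0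
        obtain ⟨j, rfl⟩ : ∃ j, k = j + 1 := ⟨k - 1, by omega⟩
        rw [dC_zero]
        simp only [ne_eq, not_true_eq_false, if_false]
        -- A's scan over l[::-1][1:] = 9…9 (j+1 nines)
        rw [show (List.replicate (j+1) '9' ++ ['0']).reverse = '0' :: List.replicate (j+1) '9'
            from by simp]
        rw [show ('0' :: List.replicate (j+1) '9').drop 1
            = List.replicate 0 '0' ++ dC 9 :: List.replicate j '9'
            from by simp [List.replicate_succ, dC_nine]]
        rw [laScan_eval _ _ 9 (by norm_num) (by norm_num) 0 0 ['1']]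
        rw [show ((9 : Nat) : Int) - 1 = (8 : Int) from by norm_num, toChars_eight]
        rw [show ((0 : Int) + ((0 : Nat) : Int) + 2) = (((2 : Nat)) : Int) from by norm_num]
        rw [PySem.List.slice_from_natCast]
        rw [show ('0' :: List.replicate (j+1) '9').drop 2 = List.replicate j '9'
            from by simp [List.replicate_succ]]
        -- B side
        rw [show ((S : Nat) : Int) - 1 = 9 * ((j : Nat) : Int) + ((8 : Nat) : Int) from by omega]
        rw [show M - 1 = j + 1 from by omega]
        rw [(DBd_lt (j+1) j 8 (by norm_num) (by omega)).1,
            (DBd_lt (j+1) j 8 (by norm_num) (by omega)).2]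
        simp [lbJoin_cons, lbJoin_append, lbJoin_replicate9, toChars_one, toChars_eight,
          toChars_zero, List.replicate_succ, replicate_append_cons']
      · -- S = 9k + r with 1 ≤ r ≤ 8: largest 9…9r, smallest r9…9
        have hne : dC r ≠ '0' := by
          have := dC_pos r (by omega) (by omega)
          intro h; rw [h] at this; exact lt_irrefl _ this
        simp only [ne_eq, hne, not_false_eq_true, if_true]
        -- B side
        rw [show ((S : Nat) : Int) - 1 = 9 * ((k : Nat) : Int) + (((r-1 : Nat)) : Int) from by omega]
        rw [show M - 1 = k from by omega]
        rw [(DBd_ge k k (r-1) (by omega) le_rfl).1, (DBd_ge k k (r-1) (by omega) le_rfl).2]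
        rw [show 9 * (((k : Nat) : Int) - ((k : Nat) : Int)) + (((r-1 : Nat)) : Int) + 1
            = ((r : Nat) : Int) from by push_cast ; omega]
        simp [lbJoin_cons, lbJoin_replicate9, toChars_digit r (by omega), List.replicate_succ]
    · -- at least one trailing zero after the digit d: the scan branch fires
      obtain ⟨z, hz⟩ : ∃ z, M - k - 1 = z + 1 := ⟨M - k - 2, by omega⟩
      rw [hz]
      rw [show (List.replicate k '9' ++ dC r :: List.replicate (z+1) '0')
          = (List.replicate k '9' ++ dC r :: List.replicate z '0') ++ ['0'] from by
            simp [List.replicate_succ' (n := z)]]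
      rw [PySem.List.pyGet?_neg_one, List.getLast?_concat]
      simp only [ne_eq, not_true_eq_false, if_false]
      by_cases hr0 : r = 0
      · -- r = 0 : S = 9k, k ≥ 1; the scan crosses z+1 zeros and breaks at a 9
        subst hr0
        obtain ⟨j, rfl⟩ : ∃ j, k = j + 1 := ⟨k - 1, by omega⟩
        rw [show ((List.replicate (j+1) '9' ++ dC 0 :: List.replicate z '0') ++ ['0']).reverse
            = List.replicate (z+2) '0' ++ '9' :: List.replicate j '9' from by
              simp [dC_zero, List.replicate_succ, replicate_append_cons', List.reverse_append,
                List.reverse_replicate]]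
        rw [show (List.replicate (z+2) '0' ++ '9' :: List.replicate j '9').drop 1
            = List.replicate (z+1) '0' ++ '9' :: List.replicate j '9' from rfl]
        rw [show List.replicate (z+1) '0' ++ '9' :: List.replicate j '9'
            = List.replicate (z+1) '0' ++ dC 9 :: List.replicate j '9' from by rw [dC_nine]]
        rw [laScan_eval _ _ 9 (by norm_num) (by norm_num) (z+1) 0 ['1']]
        rw [show ((9 : Nat) : Int) - 1 = (8 : Int) from by norm_num, toChars_eight]
        rw [show ((0 : Int) + (((z+1 : Nat)) : Int) + 2) = (((z+3 : Nat)) : Int) from by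
              push_cast ; ring]
        rw [PySem.List.slice_from_natCast]
        rw [show z + 3 = (z + 2) + 1 from rfl, drop_replicate]
        rw [show ('9' :: List.replicate j '9').drop 1 = List.replicate j '9' from rfl]
        -- B side
        rw [show ((S : Nat) : Int) - 1 = 9 * ((j : Nat) : Int) + ((8 : Nat) : Int) from by omega]
        rw [(DBd_lt (M - 1) j 8 (by norm_num) (by omega)).1,
            (DBd_lt (M - 1) j 8 (by norm_num) (by omega)).2]
        rw [show M - 1 - j - 1 = z + 1 from by omega]
        simp [lbJoin_cons, lbJoin_append, lbJoin_replicate9, lbJoin_replicate0, toChars_one,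
          toChars_eight, toChars_zero, dC_zero, List.replicate_succ, List.reverse_append,
          replicate_append_cons']
      · -- 1 ≤ r ≤ 8 : the scan crosses z zeros and breaks at d = r
        rw [show ((List.replicate k '9' ++ dC r :: List.replicate z '0') ++ ['0']).reverse
            = List.replicate (z+1) '0' ++ dC r :: List.replicate k '9' from by
              simp [List.replicate_succ, List.reverse_append, List.reverse_replicate]]
        rw [show (List.replicate (z+1) '0' ++ dC r :: List.replicate k '9').drop 1
            = List.replicate z '0' ++ dC r :: List.replicate k '9' from rfl]
        rw [laScan_eval _ _ r (by omega) (by omega) z 0 ['1']]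
        rw [show ((r : Nat) : Int) - 1 = (((r-1 : Nat)) : Int) from by omega,
            toChars_digit (r-1) (by omega)]
        rw [show ((0 : Int) + ((z : Nat) : Int) + 2) = (((z+2 : Nat)) : Int) from by
              push_cast ; ring]
        rw [PySem.List.slice_from_natCast]
        rw [show z + 2 = (z + 1) + 1 from rfl, drop_replicate]
        rw [show (dC r :: List.replicate k '9').drop 1 = List.replicate k '9' from rfl]
        -- B side
        rw [show ((S : Nat) : Int) - 1 = 9 * ((k : Nat) : Int) + (((r-1 : Nat)) : Int) from by omega]
        rw [(DBd_lt (M - 1) k (r-1) (by omega) (by omega)).1,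
            (DBd_lt (M - 1) k (r-1) (by omega) (by omega)).2]
        rw [show M - 1 - k - 1 = z from by omega]
        simp [lbJoin_cons, lbJoin_append, lbJoin_replicate9, lbJoin_replicate0, toChars_one,
          toChars_digit (r-1) (by omega), List.replicate_succ, List.reverse_append,
          replicate_append_cons']
  · -- S = 9*M : all nines on both sides
    have hrepl : List.replicate (M-1) '9' ++ ['9'] = List.replicate M '9' := by
      rw [← List.replicate_succ']; congr 1; omega
    have hLAc : LA M ((S : Nat) : Int) = List.replicate (M-1) '9' ++ ['9'] := by
      rw [show ((S : Nat) : Int) = 9 * ((M : Nat) : Int) from by omega, LA_nines M, ← hrepl]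
    rw [hLAc]
    rw [PySem.List.pyGet?_neg_one, List.getLast?_concat]
    simp only [ne_eq]
    rw [if_pos (by decide : ¬ ('9' : Char) = '0')]
    -- B side
    rw [show ((S : Nat) : Int) - 1 = 9 * (((M-1 : Nat)) : Int) + ((8 : Nat) : Int) from by omega]
    rw [(DBd_ge (M-1) (M-1) 8 (by norm_num) le_rfl).1, (DBd_ge (M-1) (M-1) 8 (by norm_num) le_rfl).2]
    rw [show 9 * ((((M-1 : Nat)) : Int) - (((M-1 : Nat)) : Int)) + ((8 : Nat) : Int) + 1
        = (9 : Int) from by push_cast ; ring]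
    have h9 : '9' :: List.replicate (M-1) '9' = List.replicate M '9' := by
      rw [← List.replicate_succ]; congr 1; omega
    simp [lbJoin_cons, lbJoin_replicate9, toChars_nine, List.reverse_append, hrepl]
    rw [← List.cons_append, h9]

-- ===== VERDICT (by name: the statement is the Claim_ definition above) =====
theorem larg_smallest_spec : Claim_equal_larg_smallest := by
  intro m s _
  unfold Spec_larg_smallest
  exact main_equiv m s
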